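-- pv_equiv track=rewrite | github.com/Jianghanxiao/Dezhou_poke | dezhou.py | leftTHS
-- ===== SOURCE A (Python) =====
-- ALL_SYMBOL = ('a', 'b', 'c', 'd')
--
-- ALL_CARD_SYMBOL = ('0','A', '2', '3', '4', '5', '6', '7', '8', '9', '10', 'J', 'Q', 'K', 'A')
--
-- def shunzi(x, n):
--     if n == 0 or n > 10:
--         raise ValueError("Coding Bug")
--     cards = []
--     for i in range(5):
--         cards.append(x+ALL_CARD_SYMBOL[n+i])
--     return tuple(cards)
--
-- def leftTHS(pool):
--     all_ths = []
--     for symbol in ALL_SYMBOL: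
--         for number in range(1, 11):
--             all_ths.append(shunzi(symbol, number))
--     min_left = 5
--     left = 0
--     for ths in all_ths:
--         left = 0
--         for i in range(5):
--             if ths[i] not in pool:
--                 left += 1
--         min_left = min(left, min_left)
--
--     return min_left
-- ===== SOURCE B (Python) =====
-- ALL_SYMBOL = ('a', 'b', 'c', 'd')
--
-- ALL_CARD_SYMBOL = ('0','A', '2', '3', '4', '5', '6', '7', '8', '9', '10', 'J', 'Q', 'K', 'A')
--
-- def leftTHS(pool):
--     pool_set = set(pool)
--     best = 0
--     for symbol in ALL_SYMBOL:
--         present = [1 if symbol + rank in pool_set else 0 for rank in ALL_CARD_SYMBOL]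
--         cnt = sum(present[1:6])
--         if cnt > best:
--             best = cnt
--         for n in range(2, 11):
--             cnt += present[n + 4] - present[n - 1]
--             if cnt > best:
--                 best = cnt
--     return 5 - best
-- ===== Notes on version B (the rewrite author's own statement) =====
-- stated objective: faster
-- what changed: Instead of materialising all 40 straight flushes and testing each of their 5 cards against the pool list (a linear scan per test), B builds one set of the pool and, per suit, a 0/1 presence array over the 14 rank positions, then slides a 5-wide window count incrementally (one add, one subtract per step), returning 5 minus the best window count.
import Mathlib
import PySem

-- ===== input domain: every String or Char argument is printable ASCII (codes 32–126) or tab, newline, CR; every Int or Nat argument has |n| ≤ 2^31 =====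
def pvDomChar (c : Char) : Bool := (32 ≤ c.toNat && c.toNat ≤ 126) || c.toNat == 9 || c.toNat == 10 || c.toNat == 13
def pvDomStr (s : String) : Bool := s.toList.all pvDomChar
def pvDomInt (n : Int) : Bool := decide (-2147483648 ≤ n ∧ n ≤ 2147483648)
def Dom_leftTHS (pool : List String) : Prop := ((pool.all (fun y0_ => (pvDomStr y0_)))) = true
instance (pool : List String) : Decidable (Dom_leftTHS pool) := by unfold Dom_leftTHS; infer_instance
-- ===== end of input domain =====

-- B replaces A's scan of all 40 straight flushes (5 pool-list membership tests each) by a per-suit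
-- presence table over the 14 rank positions and a sliding 5-window count; return value only.

-- ===== PORT A =====
def pvAllSymbol : List String := ["a", "b", "c", "d"]

def pvAllCardSymbol : List String :=
  ["0", "A", "2", "3", "4", "5", "6", "7", "8", "9", "10", "J", "Q", "K", "A"]

-- shunzi: the ValueError guard is ported as `none`; leftTHS only calls it with n ∈ 1..10,
-- where ALL_CARD_SYMBOL[n+i] is always in range, so pyGetD is exact there.
def shunziPort (x : String) (n : Int) : Option (List String) :=
  if n = 0 ∨ n > 10 then none
  else some ((PySem.List.pyRange 0 5 1).foldl
    (fun cards i => cards ++ [x ++ PySem.List.pyGetD pvAllCardSymbol (n + i) ""]) [])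

def leftTHS (pool : List String) : Int :=
  let all_ths := pvAllSymbol.foldl (fun acc symbol =>
    (PySem.List.pyRange 1 11 1).foldl
      (fun acc number => acc ++ [(shunziPort symbol number).getD []]) acc) []
  let min_left : Int := 5
  all_ths.foldl (fun min_left ths =>
    let left := (PySem.List.pyRange 0 5 1).foldl
      (fun left i => if PySem.List.pyGetD ths i "" ∈ pool then left else left + 1) (0 : Int)
    min left min_left) min_left

-- ===== PORT B =====
def leftTHS_alt (pool : List String) : Int :=
  let pool_set := PySem.Set.ofList pool
  let best := pvAllSymbol.foldl (fun best symbol =>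
    let present : List Int := pvAllCardSymbol.map
      (fun rank => if (symbol ++ rank) ∈ pool_set then (1 : Int) else 0)
    let cnt := (PySem.List.slice present (some 1) (some 6)).sum
    let best := if cnt > best then cnt else best
    ((PySem.List.pyRange 2 11 1).foldl
      (fun (st : Int × Int) n =>
        let cnt := st.1 + PySem.List.pyGetD present (n + 4) 0 - PySem.List.pyGetD present (n - 1) 0
        (cnt, if cnt > st.2 then cnt else st.2)) (cnt, best)).2) (0 : Int)
  5 - best

-- ===== PRECONDITION & SPEC =====
def Spec_leftTHS (pool : List String) (out : Int) : Prop := out = leftTHS_alt pool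
instance (pool : List String) (out : Int) : Decidable (Spec_leftTHS pool out) := by unfold Spec_leftTHS; infer_instance

-- ===== CLAIM (what is proved, stated in full; the proofs are below) =====
def Claim_equal_leftTHS : Prop := ∀ (pool : List String), Dom_leftTHS pool → Spec_leftTHS pool (leftTHS pool)

-- ===== LEMMAS AND PROOFS =====
theorem pv_ite_step (c : Prop) [Decidable c] (X : Int) :
    (if c then X else X + 1) = X + (if c then 0 else 1) := by split <;> simp

theorem pv_win (c0 c1 c2 c3 c4 : Prop) [Decidable c0] [Decidable c1] [Decidable c2]
    [Decidable c3] [Decidable c4] :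
    ((((((0 : Int) + (if c0 then 0 else 1)) + (if c1 then 0 else 1)) + (if c2 then 0 else 1))
        + (if c3 then 0 else 1)) + (if c4 then 0 else 1))
      = 5 - ((if c0 then (1 : Int) else 0) + ((if c1 then (1 : Int) else 0)
          + ((if c2 then (1 : Int) else 0) + ((if c3 then (1 : Int) else 0)
          + ((if c4 then (1 : Int) else 0) + 0))))) := by
  split_ifs <;> norm_num

theorem pv_min_sub (a b : Int) : min (5 - a) (5 - b) = 5 - max a b := by omega

theorem pv_min_sub5 (a : Int) : min (5 - a) 5 = 5 - max a 0 := by omega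

theorem pv_if_max (a b : Int) : (if a > b then a else b) = max a b := by split <;> omega

theorem pv_mem_set (pool : List String) (s : String) :
    (if s ∈ PySem.Set.ofList pool then (1 : Int) else 0) = (if s ∈ pool then (1 : Int) else 0) := by
  simp [PySem.Set.mem_ofList]

theorem pv_slice15 {α : Type} (a0 a1 a2 a3 a4 a5 a6 a7 a8 a9 a10 a11 a12 a13 a14 : α) :
    PySem.List.slice [a0, a1, a2, a3, a4, a5, a6, a7, a8, a9, a10, a11, a12, a13, a14] (some 1) (some 6) = [a1, a2, a3, a4, a5] := rfl

theorem pv_g1 {α : Type} (a0 a1 a2 a3 a4 a5 a6 a7 a8 a9 a10 a11 a12 a13 a14 : α) (d : α) :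
    PySem.List.pyGetD [a0, a1, a2, a3, a4, a5, a6, a7, a8, a9, a10, a11, a12, a13, a14] (1 : Int) d = a1 := rfl
theorem pv_g2 {α : Type} (a0 a1 a2 a3 a4 a5 a6 a7 a8 a9 a10 a11 a12 a13 a14 : α) (d : α) :
    PySem.List.pyGetD [a0, a1, a2, a3, a4, a5, a6, a7, a8, a9, a10, a11, a12, a13, a14] (2 : Int) d = a2 := rfl
theorem pv_g3 {α : Type} (a0 a1 a2 a3 a4 a5 a6 a7 a8 a9 a10 a11 a12 a13 a14 : α) (d : α) :
    PySem.List.pyGetD [a0, a1, a2, a3, a4, a5, a6, a7, a8, a9, a10, a11, a12, a13, a14] (3 : Int) d = a3 := rfl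
theorem pv_g4 {α : Type} (a0 a1 a2 a3 a4 a5 a6 a7 a8 a9 a10 a11 a12 a13 a14 : α) (d : α) :
    PySem.List.pyGetD [a0, a1, a2, a3, a4, a5, a6, a7, a8, a9, a10, a11, a12, a13, a14] (4 : Int) d = a4 := rfl
theorem pv_g5 {α : Type} (a0 a1 a2 a3 a4 a5 a6 a7 a8 a9 a10 a11 a12 a13 a14 : α) (d : α) :
    PySem.List.pyGetD [a0, a1, a2, a3, a4, a5, a6, a7, a8, a9, a10, a11, a12, a13, a14] (5 : Int) d = a5 := rfl
theorem pv_g6 {α : Type} (a0 a1 a2 a3 a4 a5 a6 a7 a8 a9 a10 a11 a12 a13 a14 : α) (d : α) :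
    PySem.List.pyGetD [a0, a1, a2, a3, a4, a5, a6, a7, a8, a9, a10, a11, a12, a13, a14] (6 : Int) d = a6 := rfl
theorem pv_g7 {α : Type} (a0 a1 a2 a3 a4 a5 a6 a7 a8 a9 a10 a11 a12 a13 a14 : α) (d : α) :
    PySem.List.pyGetD [a0, a1, a2, a3, a4, a5, a6, a7, a8, a9, a10, a11, a12, a13, a14] (7 : Int) d = a7 := rfl
theorem pv_g8 {α : Type} (a0 a1 a2 a3 a4 a5 a6 a7 a8 a9 a10 a11 a12 a13 a14 : α) (d : α) :
    PySem.List.pyGetD [a0, a1, a2, a3, a4, a5, a6, a7, a8, a9, a10, a11, a12, a13, a14] (8 : Int) d = a8 := rfl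
theorem pv_g9 {α : Type} (a0 a1 a2 a3 a4 a5 a6 a7 a8 a9 a10 a11 a12 a13 a14 : α) (d : α) :
    PySem.List.pyGetD [a0, a1, a2, a3, a4, a5, a6, a7, a8, a9, a10, a11, a12, a13, a14] (9 : Int) d = a9 := rfl
theorem pv_g10 {α : Type} (a0 a1 a2 a3 a4 a5 a6 a7 a8 a9 a10 a11 a12 a13 a14 : α) (d : α) :
    PySem.List.pyGetD [a0, a1, a2, a3, a4, a5, a6, a7, a8, a9, a10, a11, a12, a13, a14] (10 : Int) d = a10 := rfl
theorem pv_g11 {α : Type} (a0 a1 a2 a3 a4 a5 a6 a7 a8 a9 a10 a11 a12 a13 a14 : α) (d : α) :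
    PySem.List.pyGetD [a0, a1, a2, a3, a4, a5, a6, a7, a8, a9, a10, a11, a12, a13, a14] (11 : Int) d = a11 := rfl
theorem pv_g12 {α : Type} (a0 a1 a2 a3 a4 a5 a6 a7 a8 a9 a10 a11 a12 a13 a14 : α) (d : α) :
    PySem.List.pyGetD [a0, a1, a2, a3, a4, a5, a6, a7, a8, a9, a10, a11, a12, a13, a14] (12 : Int) d = a12 := rfl
theorem pv_g13 {α : Type} (a0 a1 a2 a3 a4 a5 a6 a7 a8 a9 a10 a11 a12 a13 a14 : α) (d : α) :
    PySem.List.pyGetD [a0, a1, a2, a3, a4, a5, a6, a7, a8, a9, a10, a11, a12, a13, a14] (13 : Int) d = a13 := rfl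
theorem pv_g14 {α : Type} (a0 a1 a2 a3 a4 a5 a6 a7 a8 a9 a10 a11 a12 a13 a14 : α) (d : α) :
    PySem.List.pyGetD [a0, a1, a2, a3, a4, a5, a6, a7, a8, a9, a10, a11, a12, a13, a14] (14 : Int) d = a14 := rfl

theorem pv_q0 {α : Type} (a0 a1 a2 a3 a4 : α) (d : α) :
    PySem.List.pyGetD [a0, a1, a2, a3, a4] (0 : Int) d = a0 := rfl
theorem pv_q1 {α : Type} (a0 a1 a2 a3 a4 : α) (d : α) :
    PySem.List.pyGetD [a0, a1, a2, a3, a4] (1 : Int) d = a1 := rfl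
theorem pv_q2 {α : Type} (a0 a1 a2 a3 a4 : α) (d : α) :
    PySem.List.pyGetD [a0, a1, a2, a3, a4] (2 : Int) d = a2 := rfl
theorem pv_q3 {α : Type} (a0 a1 a2 a3 a4 : α) (d : α) :
    PySem.List.pyGetD [a0, a1, a2, a3, a4] (3 : Int) d = a3 := rfl
theorem pv_q4 {α : Type} (a0 a1 a2 a3 a4 : α) (d : α) :
    PySem.List.pyGetD [a0, a1, a2, a3, a4] (4 : Int) d = a4 := rfl

set_option maxHeartbeats 4000000 in
theorem leftTHS_eq (pool : List String) : leftTHS pool = leftTHS_alt pool := by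
  have h05 : PySem.List.pyRange 0 5 1 = [0, 1, 2, 3, 4] := by decide
  have h211 : PySem.List.pyRange 2 11 1 = [2, 3, 4, 5, 6, 7, 8, 9, 10] := by decide
  have hths : List.foldl (fun acc symbol =>
      (PySem.List.pyRange 1 11 1).foldl
        (fun acc number => acc ++ [(shunziPort symbol number).getD []]) acc) [] pvAllSymbol
      = [["a" ++ "A", "a" ++ "2", "a" ++ "3", "a" ++ "4", "a" ++ "5"],
    ["a" ++ "2", "a" ++ "3", "a" ++ "4", "a" ++ "5", "a" ++ "6"],
    ["a" ++ "3", "a" ++ "4", "a" ++ "5", "a" ++ "6", "a" ++ "7"],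
    ["a" ++ "4", "a" ++ "5", "a" ++ "6", "a" ++ "7", "a" ++ "8"],
    ["a" ++ "5", "a" ++ "6", "a" ++ "7", "a" ++ "8", "a" ++ "9"],
    ["a" ++ "6", "a" ++ "7", "a" ++ "8", "a" ++ "9", "a" ++ "10"],
    ["a" ++ "7", "a" ++ "8", "a" ++ "9", "a" ++ "10", "a" ++ "J"],
    ["a" ++ "8", "a" ++ "9", "a" ++ "10", "a" ++ "J", "a" ++ "Q"],
    ["a" ++ "9", "a" ++ "10", "a" ++ "J", "a" ++ "Q", "a" ++ "K"],
    ["a" ++ "10", "a" ++ "J", "a" ++ "Q", "a" ++ "K", "a" ++ "A"],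
    ["b" ++ "A", "b" ++ "2", "b" ++ "3", "b" ++ "4", "b" ++ "5"],
    ["b" ++ "2", "b" ++ "3", "b" ++ "4", "b" ++ "5", "b" ++ "6"],
    ["b" ++ "3", "b" ++ "4", "b" ++ "5", "b" ++ "6", "b" ++ "7"],
    ["b" ++ "4", "b" ++ "5", "b" ++ "6", "b" ++ "7", "b" ++ "8"],
    ["b" ++ "5", "b" ++ "6", "b" ++ "7", "b" ++ "8", "b" ++ "9"],
    ["b" ++ "6", "b" ++ "7", "b" ++ "8", "b" ++ "9", "b" ++ "10"],
    ["b" ++ "7", "b" ++ "8", "b" ++ "9", "b" ++ "10", "b" ++ "J"],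
    ["b" ++ "8", "b" ++ "9", "b" ++ "10", "b" ++ "J", "b" ++ "Q"],
    ["b" ++ "9", "b" ++ "10", "b" ++ "J", "b" ++ "Q", "b" ++ "K"],
    ["b" ++ "10", "b" ++ "J", "b" ++ "Q", "b" ++ "K", "b" ++ "A"],
    ["c" ++ "A", "c" ++ "2", "c" ++ "3", "c" ++ "4", "c" ++ "5"],
    ["c" ++ "2", "c" ++ "3", "c" ++ "4", "c" ++ "5", "c" ++ "6"],
    ["c" ++ "3", "c" ++ "4", "c" ++ "5", "c" ++ "6", "c" ++ "7"],
    ["c" ++ "4", "c" ++ "5", "c" ++ "6", "c" ++ "7", "c" ++ "8"],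
    ["c" ++ "5", "c" ++ "6", "c" ++ "7", "c" ++ "8", "c" ++ "9"],
    ["c" ++ "6", "c" ++ "7", "c" ++ "8", "c" ++ "9", "c" ++ "10"],
    ["c" ++ "7", "c" ++ "8", "c" ++ "9", "c" ++ "10", "c" ++ "J"],
    ["c" ++ "8", "c" ++ "9", "c" ++ "10", "c" ++ "J", "c" ++ "Q"],
    ["c" ++ "9", "c" ++ "10", "c" ++ "J", "c" ++ "Q", "c" ++ "K"],
    ["c" ++ "10", "c" ++ "J", "c" ++ "Q", "c" ++ "K", "c" ++ "A"],
    ["d" ++ "A", "d" ++ "2", "d" ++ "3", "d" ++ "4", "d" ++ "5"],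
    ["d" ++ "2", "d" ++ "3", "d" ++ "4", "d" ++ "5", "d" ++ "6"],
    ["d" ++ "3", "d" ++ "4", "d" ++ "5", "d" ++ "6", "d" ++ "7"],
    ["d" ++ "4", "d" ++ "5", "d" ++ "6", "d" ++ "7", "d" ++ "8"],
    ["d" ++ "5", "d" ++ "6", "d" ++ "7", "d" ++ "8", "d" ++ "9"],
    ["d" ++ "6", "d" ++ "7", "d" ++ "8", "d" ++ "9", "d" ++ "10"],
    ["d" ++ "7", "d" ++ "8", "d" ++ "9", "d" ++ "10", "d" ++ "J"],
    ["d" ++ "8", "d" ++ "9", "d" ++ "10", "d" ++ "J", "d" ++ "Q"],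
    ["d" ++ "9", "d" ++ "10", "d" ++ "J", "d" ++ "Q", "d" ++ "K"],
    ["d" ++ "10", "d" ++ "J", "d" ++ "Q", "d" ++ "K", "d" ++ "A"]] := by decide
  simp only [leftTHS, leftTHS_alt]
  rw [hths]
  simp only [h05, h211, pvAllSymbol, pvAllCardSymbol, List.foldl_cons, List.foldl_nil,
    List.map_cons, List.map_nil, List.sum_cons, List.sum_nil,
    Int.reduceAdd, Int.reduceSub, pv_q0, pv_q1, pv_q2, pv_q3, pv_q4,
    pv_g1, pv_g2, pv_g3, pv_g4, pv_g5, pv_g6, pv_g7, pv_g8, pv_g9, pv_g10,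
    pv_g11, pv_g12, pv_g13, pv_g14, pv_slice15, pv_mem_set,
    pv_ite_step, pv_win, pv_min_sub, pv_min_sub5, pv_if_max]
  refine congrArg₂ (· - ·) rfl ?_
  refine congrArg₂ max (by ring_nf) ?_
  refine congrArg₂ max (by ring_nf) ?_
  refine congrArg₂ max (by ring_nf) ?_
  refine congrArg₂ max (by ring_nf) ?_
  refine congrArg₂ max (by ring_nf) ?_
  refine congrArg₂ max (by ring_nf) ?_
  refine congrArg₂ max (by ring_nf) ?_
  refine congrArg₂ max (by ring_nf) ?_
  refine congrArg₂ max (by ring_nf) ?_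
  refine congrArg₂ max (by ring_nf) ?_
  refine congrArg₂ max (by ring_nf) ?_
  refine congrArg₂ max (by ring_nf) ?_
  refine congrArg₂ max (by ring_nf) ?_
  refine congrArg₂ max (by ring_nf) ?_
  refine congrArg₂ max (by ring_nf) ?_
  refine congrArg₂ max (by ring_nf) ?_
  refine congrArg₂ max (by ring_nf) ?_
  refine congrArg₂ max (by ring_nf) ?_
  refine congrArg₂ max (by ring_nf) ?_
  refine congrArg₂ max (by ring_nf) ?_
  refine congrArg₂ max (by ring_nf) ?_
  refine congrArg₂ max (by ring_nf) ?_
  refine congrArg₂ max (by ring_nf) ?_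
  refine congrArg₂ max (by ring_nf) ?_
  refine congrArg₂ max (by ring_nf) ?_
  refine congrArg₂ max (by ring_nf) ?_
  refine congrArg₂ max (by ring_nf) ?_
  refine congrArg₂ max (by ring_nf) ?_
  refine congrArg₂ max (by ring_nf) ?_
  refine congrArg₂ max (by ring_nf) ?_
  refine congrArg₂ max (by ring_nf) ?_
  refine congrArg₂ max (by ring_nf) ?_
  refine congrArg₂ max (by ring_nf) ?_
  refine congrArg₂ max (by ring_nf) ?_
  refine congrArg₂ max (by ring_nf) ?_
  refine congrArg₂ max (by ring_nf) ?_
  refine congrArg₂ max (by ring_nf) ?_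
  refine congrArg₂ max (by ring_nf) ?_
  refine congrArg₂ max (by ring_nf) ?_
  refine congrArg₂ max (by ring_nf) ?_
  rfl

-- ===== VERDICT (by name: the statement is the Claim_ definition above) =====
theorem leftTHS_spec : Claim_equal_leftTHS := by
  intro pool _
  unfold Spec_leftTHS
  exact leftTHS_eq pool
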